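-- pv_equiv track=rewrite | github.com/AseiSugiyama/TIL | python/AtCoder/Beginner Contest 124/C - Coloring Colorfully/main.py | count_repaint_tiles
-- ===== SOURCE A (Python) =====
-- def count_repaint_tiles(tiles):
--     if len(tiles) == 0:
--         return 0
--     counts = 0
--     color = tiles[0]
--     for tile in tiles[1:]:
--         if tile == color:
--             counts = counts + 1
--         color = 1 - color
--     return counts
-- ===== SOURCE B (Python) =====
-- def count_repaint_tiles(tiles):
--     if len(tiles) == 0:
--         return 0
--     c = tiles[0]
--     return tiles[1::2].count(c) + tiles[2::2].count(1 - c)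
-- ===== Notes on version B (the rewrite author's own statement) =====
-- stated objective: simpler
-- what changed: Replaces the flipping-state loop with a parity decomposition: the expected colour depends only on index parity, so B counts matches of the first colour on the odd-index slice plus matches of its complement on the even-index slice starting at index 2.
import Mathlib
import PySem

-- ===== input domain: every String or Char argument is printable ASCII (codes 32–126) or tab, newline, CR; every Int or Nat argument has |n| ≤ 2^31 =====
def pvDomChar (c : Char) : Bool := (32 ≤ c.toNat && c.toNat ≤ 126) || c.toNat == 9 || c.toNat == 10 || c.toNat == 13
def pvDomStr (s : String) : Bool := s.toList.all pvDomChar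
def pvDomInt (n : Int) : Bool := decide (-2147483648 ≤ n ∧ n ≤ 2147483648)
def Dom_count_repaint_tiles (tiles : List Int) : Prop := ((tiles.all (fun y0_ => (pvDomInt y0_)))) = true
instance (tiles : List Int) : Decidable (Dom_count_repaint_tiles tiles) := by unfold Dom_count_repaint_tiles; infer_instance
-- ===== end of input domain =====

-- B replaces A's flipping-state loop with a parity decomposition: count tiles[0]-matches
-- on the odd-index positions plus (1-tiles[0])-matches on the even positions from index 2 (simpler).


-- ===== PORT A =====
-- the 'for tile in tiles[1:]' loop with state (counts, color)
def crtLoop : List Int → Int → Int → Int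
  | [], counts, _ => counts
  | tile :: rest, counts, color =>
      crtLoop rest (if tile == color then counts + 1 else counts) (1 - color)

def count_repaint_tiles (tiles : List Int) : Int :=
  match tiles with
  | [] => 0                         -- if len(tiles) == 0: return 0
  | color :: rest => crtLoop rest 0 color   -- color = tiles[0]; loop over tiles[1:]

-- ===== PORT B =====
-- exact hand port of a positive-step-2 slice xs[::2]: every other element
def everyOther : List Int → List Int
  | [] => []
  | [x] => [x]
  | x :: _ :: rest => x :: everyOther rest

def count_repaint_tiles_alt (tiles : List Int) : Int :=
  match tiles with
  | [] => 0
  | c :: _ =>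
      -- tiles[1::2] = everyOther (tiles.drop 1), tiles[2::2] = everyOther (tiles.drop 2)
      ((everyOther (tiles.drop 1)).count c : Int)
        + ((everyOther (tiles.drop 2)).count (1 - c) : Int)

-- ===== PRECONDITION & SPEC =====
def Spec_count_repaint_tiles (tiles : List Int) (out : Int) : Prop := out = count_repaint_tiles_alt tiles
instance (tiles : List Int) (out : Int) : Decidable (Spec_count_repaint_tiles tiles out) := by unfold Spec_count_repaint_tiles; infer_instance

-- ===== CLAIM (what is proved, stated in full; the proofs are below) =====
def Claim_equal_count_repaint_tiles : Prop := ∀ (tiles : List Int), Dom_count_repaint_tiles tiles → Spec_count_repaint_tiles tiles (count_repaint_tiles tiles)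

-- ===== LEMMAS AND PROOFS =====
theorem everyOther_cons (x : Int) (l : List Int) :
    everyOther (x :: l) = x :: everyOther l.tail := by
  cases l <;> simp [everyOther]

theorem crtLoop_eq (l : List Int) : ∀ (acc c : Int),
    crtLoop l acc c
      = acc + ((everyOther l).count c : Int) + ((everyOther l.tail).count (1 - c) : Int) := by
  induction l with
  | nil => intro acc c; simp [crtLoop, everyOther]
  | cons x l ih =>
    intro acc c
    have h11 : 1 - (1 - c) = c := by ring
    simp only [crtLoop, ih, everyOther_cons, List.tail_cons, h11, List.count_cons]
    by_cases hx : x = c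
    · simp [hx]; ring
    · simp [hx, beq_iff_eq]; ring

-- ===== VERDICT (by name: the statement is the Claim_ definition above) =====
theorem count_repaint_tiles_spec : Claim_equal_count_repaint_tiles := by
  intro tiles _
  unfold Spec_count_repaint_tiles count_repaint_tiles count_repaint_tiles_alt
  cases tiles with
  | nil => rfl
  | cons c rest =>
    simp only [crtLoop_eq, List.drop_succ_cons, List.drop_zero, List.drop_one]
    ring
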